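-- pv_equiv track=rewrite | github.com/Kira41/pmta | pmta_accounting_bridge.py | _normalized_outcome
-- ===== SOURCE A (Python) =====
-- from typing import List, Tuple, Dict, Any, Optional
--
-- def _event_value(ev: Dict[str, Any], *names: str) -> str:
--     aliases = {str(n or "").strip().lower().replace("_", "-") for n in names if str(n or "").strip()}
--     if not aliases:
--         return ""
--     for k, v in (ev or {}).items():
--         kk = str(k or "").strip().lower().replace("_", "-")
--         vv = str(v or "").strip()
--         if kk in aliases and vv:
--             return vv
--     for k, v in (ev or {}).items():
--         kk = str(k or "").strip().lower().replace("_", "-")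
--         vv = str(v or "").strip()
--         if vv and any(a in kk for a in aliases):
--             return vv
--     return ""
--
-- def _normalized_outcome(ev: Dict[str, Any]) -> str:
--     typ = str(_event_value(ev, "type") or "").strip().lower()
--     dsn_action = str(_event_value(ev, "dsnAction", "dsn_action") or "").strip().lower()
--     dsn_status = str(_event_value(ev, "dsnStatus", "dsn_status") or "").strip().lower()
--     dsn_diag = str(_event_value(ev, "dsnDiag", "dsn_diag") or "").strip().lower()
--
--     if any(x in dsn_diag for x in ("complaint", "fbl", "feedback loop", "abuse")):
--         return "complained"
--     if typ == "d" or dsn_action == "relayed" or dsn_status.startswith("2"):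
--         return "delivered"
--     if typ == "t" or dsn_action == "delayed" or dsn_status.startswith("4"):
--         return "deferred"
--     if typ == "b" or dsn_action == "failed" or dsn_status.startswith("5"):
--         return "bounced"
--     return "unknown"
-- ===== SOURCE B (Python) =====
-- from typing import Dict, Any
--
-- def _event_value(ev: Dict[str, Any], *names: str) -> str:
--     aliases = {str(n or "").strip().lower().replace("_", "-") for n in names if str(n or "").strip()}
--     if not aliases:
--         return ""
--     exact = None
--     fuzzy = None
--     for k, v in (ev or {}).items():
--         kk = str(k or "").strip().lower().replace("_", "-")
--         vv = str(v or "").strip()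
--         if not vv:
--             continue
--         if exact is None and kk in aliases:
--             exact = vv
--         if fuzzy is None and any(a in kk for a in aliases):
--             fuzzy = vv
--     if exact is not None:
--         return exact
--     if fuzzy is not None:
--         return fuzzy
--     return ""
--
-- def _normalized_outcome(ev: Dict[str, Any]) -> str:
--     typ = str(_event_value(ev, "type") or "").strip().lower()
--     dsn_action = str(_event_value(ev, "dsnAction", "dsn_action") or "").strip().lower()
--     dsn_status = str(_event_value(ev, "dsnStatus", "dsn_status") or "").strip().lower()
--     dsn_diag = str(_event_value(ev, "dsnDiag", "dsn_diag") or "").strip().lower()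
--
--     checks = [
--         ("complained", any(x in dsn_diag for x in ("complaint", "fbl", "feedback loop", "abuse"))),
--         ("delivered", typ == "d" or dsn_action == "relayed" or dsn_status.startswith("2")),
--         ("deferred", typ == "t" or dsn_action == "delayed" or dsn_status.startswith("4")),
--         ("bounced", typ == "b" or dsn_action == "failed" or dsn_status.startswith("5")),
--     ]
--     return next((label for label, hit in checks if hit), "unknown")
-- ===== Notes on version B (the rewrite author's own statement) =====
-- stated objective: alternative
-- what changed: _event_value now scans the dict once, carrying first exact-match and first substring-match candidates and deciding after the pass, instead of A's two full passes; the outcome cascade becomes a (label, hit) table scanned with next().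
import Mathlib
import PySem

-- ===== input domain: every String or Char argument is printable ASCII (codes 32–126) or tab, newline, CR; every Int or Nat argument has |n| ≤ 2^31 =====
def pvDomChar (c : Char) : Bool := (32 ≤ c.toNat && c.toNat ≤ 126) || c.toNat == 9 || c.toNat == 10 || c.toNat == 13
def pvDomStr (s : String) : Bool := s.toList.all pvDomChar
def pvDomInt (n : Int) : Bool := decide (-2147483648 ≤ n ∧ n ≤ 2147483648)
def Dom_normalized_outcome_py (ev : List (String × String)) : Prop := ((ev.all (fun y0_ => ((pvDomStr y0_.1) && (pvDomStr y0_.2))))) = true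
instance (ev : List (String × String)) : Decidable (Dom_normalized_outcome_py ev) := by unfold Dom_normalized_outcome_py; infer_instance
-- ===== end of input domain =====

-- B replaces _event_value's two passes over the dict by a single pass holding an
-- exact-match and a substring-match candidate, and _normalized_outcome's return
-- cascade by a (label, hit) table scanned with next(); objective: alternative
-- decomposition, same cost.

-- ===== PORT A =====
-- str(k or "").strip().lower().replace("_", "-")  (identical line in both Pythons)
def pvNormKey (s : String) : String :=
  PySem.Str.replace (PySem.Str.lower (PySem.Str.strip s)) "_" "-"

-- {str(n or "").strip().lower().replace("_", "-") for n in names if str(n or "").strip()}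
def pvAliases (names : List String) : PySem.Set String :=
  names.foldl
    (fun acc n => if PySem.Str.strip n ≠ "" then PySem.Set.add acc (pvNormKey n) else acc)
    PySem.Set.empty

-- first loop of A's _event_value: exact alias match, returning vv (some = return)
def pvLoop1 (aliases : PySem.Set String) : List (String × String) → Option String
  | [] => none
  | (k, v) :: rest =>
    let kk := pvNormKey k
    let vv := PySem.Str.strip v
    if PySem.Set.contains aliases kk && vv != "" then some vv
    else pvLoop1 aliases rest

-- second loop of A's _event_value: alias as substring of the key
def pvLoop2 (aliases : PySem.Set String) : List (String × String) → Option String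
  | [] => none
  | (k, v) :: rest =>
    let kk := pvNormKey k
    let vv := PySem.Str.strip v
    if vv != "" && aliases.any (fun a => PySem.Str.isIn a kk) then some vv
    else pvLoop2 aliases rest

def pvEventValue (ev : List (String × String)) (names : List String) : String :=
  let aliases := pvAliases names
  if aliases.isEmpty then ""
  else
    match pvLoop1 aliases ev with
    | some vv => vv
    | none =>
      match pvLoop2 aliases ev with
      | some vv => vv
      | none => ""

def normalized_outcome_py (ev : List (String × String)) : String :=
  let typ := PySem.Str.lower (PySem.Str.strip (pvEventValue ev ["type"]))
  let dsnAction := PySem.Str.lower (PySem.Str.strip (pvEventValue ev ["dsnAction", "dsn_action"]))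
  let dsnStatus := PySem.Str.lower (PySem.Str.strip (pvEventValue ev ["dsnStatus", "dsn_status"]))
  let dsnDiag := PySem.Str.lower (PySem.Str.strip (pvEventValue ev ["dsnDiag", "dsn_diag"]))
  if ["complaint", "fbl", "feedback loop", "abuse"].any (fun x => PySem.Str.isIn x dsnDiag) then
    "complained"
  else if typ == "d" || dsnAction == "relayed" || PySem.Str.startswith dsnStatus "2" then
    "delivered"
  else if typ == "t" || dsnAction == "delayed" || PySem.Str.startswith dsnStatus "4" then
    "deferred"
  else if typ == "b" || dsnAction == "failed" || PySem.Str.startswith dsnStatus "5" then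
    "bounced"
  else "unknown"

-- ===== PORT B =====
-- single pass of B's _event_value: loop body, then the fold over the dict;
-- state = (exact, fuzzy) candidates
def pvStep (aliases : PySem.Set String) (st : Option String × Option String)
    (kv : String × String) : Option String × Option String :=
  let kk := pvNormKey kv.1
  let vv := PySem.Str.strip kv.2
  if vv == "" then st
  else
    (if st.1.isNone && PySem.Set.contains aliases kk then some vv else st.1,
     if st.2.isNone && aliases.any (fun a => PySem.Str.isIn a kk) then some vv else st.2)

def pvScan (aliases : PySem.Set String) (ev : List (String × String)) :
    Option String × Option String :=
  ev.foldl (pvStep aliases) (none, none)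

def pvEventValueAlt (ev : List (String × String)) (names : List String) : String :=
  let aliases := pvAliases names
  if aliases.isEmpty then ""
  else
    let st := pvScan aliases ev
    match st.1 with
    | some e => e
    | none =>
      match st.2 with
      | some f => f
      | none => ""

def normalized_outcome_py_alt (ev : List (String × String)) : String :=
  let typ := PySem.Str.lower (PySem.Str.strip (pvEventValueAlt ev ["type"]))
  let dsnAction := PySem.Str.lower (PySem.Str.strip (pvEventValueAlt ev ["dsnAction", "dsn_action"]))
  let dsnStatus := PySem.Str.lower (PySem.Str.strip (pvEventValueAlt ev ["dsnStatus", "dsn_status"]))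
  let dsnDiag := PySem.Str.lower (PySem.Str.strip (pvEventValueAlt ev ["dsnDiag", "dsn_diag"]))
  let checks : List (String × Bool) :=
    [("complained", ["complaint", "fbl", "feedback loop", "abuse"].any (fun x => PySem.Str.isIn x dsnDiag)),
     ("delivered", typ == "d" || dsnAction == "relayed" || PySem.Str.startswith dsnStatus "2"),
     ("deferred", typ == "t" || dsnAction == "delayed" || PySem.Str.startswith dsnStatus "4"),
     ("bounced", typ == "b" || dsnAction == "failed" || PySem.Str.startswith dsnStatus "5")]
  match checks.find? (fun c => c.2) with
  | some c => c.1
  | none => "unknown"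

-- ===== PRECONDITION & SPEC =====
def Spec_normalized_outcome_py (ev : List (String × String)) (out : String) : Prop := out = normalized_outcome_py_alt ev
instance (ev : List (String × String)) (out : String) : Decidable (Spec_normalized_outcome_py ev out) := by unfold Spec_normalized_outcome_py; infer_instance

-- ===== CLAIM (what is proved, stated in full; the proofs are below) =====
def Claim_equal_normalized_outcome_py : Prop := ∀ (ev : List (String × String)), Dom_normalized_outcome_py ev → Spec_normalized_outcome_py ev (normalized_outcome_py ev)

-- ===== LEMMAS AND PROOFS =====

-- the fold's two slots are the two loops' first hits, kept from any starting state
lemma pvScan_foldl (aliases : PySem.Set String) :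
    ∀ (ev : List (String × String)) (e f : Option String),
      ev.foldl (pvStep aliases) (e, f)
      = (e.orElse (fun _ => pvLoop1 aliases ev), f.orElse (fun _ => pvLoop2 aliases ev)) := by
  intro ev
  induction ev with
  | nil => intro e f; cases e <;> cases f <;> rfl
  | cons kv rest ih =>
    intro e f
    obtain ⟨k, v⟩ := kv
    rw [List.foldl_cons]
    by_cases hv : (PySem.Str.strip v == "") = true
    · have hv' : PySem.Str.strip v = "" := by simpa using hv
      have hs : pvStep aliases (e, f) (k, v) = (e, f) := by simp [pvStep, hv]
      have h1 : pvLoop1 aliases ((k, v) :: rest) = pvLoop1 aliases rest := by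
        simp [pvLoop1, hv']
      have h2 : pvLoop2 aliases ((k, v) :: rest) = pvLoop2 aliases rest := by
        simp [pvLoop2, hv']
      rw [hs, ih, h1, h2]
    · have hv' : ¬ PySem.Str.strip v = "" := by simpa using hv
      have hs : pvStep aliases (e, f) (k, v) =
          ((if e.isNone && PySem.Set.contains aliases (pvNormKey k) then
              some (PySem.Str.strip v) else e),
           (if f.isNone && aliases.any (fun a => PySem.Str.isIn a (pvNormKey k)) then
              some (PySem.Str.strip v) else f)) := by
        simp [pvStep, hv]
      rw [hs, ih]
      cases e <;> cases f <;>
        simp [pvLoop1, pvLoop2, hv', Option.orElse] <;>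
        split_ifs <;> simp_all

lemma pvEventValueAlt_eq (ev : List (String × String)) (names : List String) :
    pvEventValueAlt ev names = pvEventValue ev names := by
  unfold pvEventValueAlt pvEventValue pvScan
  simp only [pvScan_foldl]
  rfl

lemma pvChain (b1 b2 b3 b4 : Bool) :
    (match List.find? (fun c => c.2)
        [("complained", b1), ("delivered", b2), ("deferred", b3), ("bounced", b4)] with
     | some c => c.1
     | none => "unknown")
    = if b1 then "complained"
      else if b2 then "delivered"
      else if b3 then "deferred"
      else if b4 then "bounced"
      else "unknown" := by
  cases b1 <;> cases b2 <;> cases b3 <;> cases b4 <;> rfl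

-- ===== VERDICT (by name: the statement is the Claim_ definition above) =====
theorem normalized_outcome_py_spec : Claim_equal_normalized_outcome_py := by
  intro ev _
  unfold Spec_normalized_outcome_py normalized_outcome_py normalized_outcome_py_alt
  simp only [pvEventValueAlt_eq, pvChain]
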